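-- pv_equiv track=rewrite | github.com/Eeun-ju/Python-CodingTest | Ch03.그리디/re3-2.py | solution
-- ===== SOURCE A (Python) =====
-- def solution(n,m,k,data):
--     answer = 0
--
--     data.sort()
--     se_data = data[-2]
--
--     while 1:
--         for _ in range(k):
--             if m == 0:
--                 break
--             answer += data[-1]
--             m -=1
--
--
--         if m == 0:
--             break
--         answer += se_data
--         m-=1
--
--
--     return answer
-- ===== SOURCE B (Python) =====
-- def solution(n, m, k, data):
--     s = sorted(data)
--     first, second = s[-1], s[-2]
--     q, r = divmod(m, k + 1)
--     cnt = q * k + r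
--     return cnt * first + (m - cnt) * second
-- ===== Notes on version B (the rewrite author's own statement) =====
-- stated objective: simpler
-- what changed: Replaces A's step-by-step simulation loop (one iteration per pick) with a closed-form count cnt=(m//(k+1))*k+m%(k+1) of picks of the largest element, so B is a sort plus three arithmetic lines.
-- outside the precondition, e.g. on solution(0, 3, -1, [1, 2]): A returns 3, B raises ZeroDivisionError; on solution(0, 3, -2, [1, 2]): A returns 3, B returns 9; on solution(0, -1, 1, [1, 2]): A does not finish within the time limit, B returns -1
import Mathlib
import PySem

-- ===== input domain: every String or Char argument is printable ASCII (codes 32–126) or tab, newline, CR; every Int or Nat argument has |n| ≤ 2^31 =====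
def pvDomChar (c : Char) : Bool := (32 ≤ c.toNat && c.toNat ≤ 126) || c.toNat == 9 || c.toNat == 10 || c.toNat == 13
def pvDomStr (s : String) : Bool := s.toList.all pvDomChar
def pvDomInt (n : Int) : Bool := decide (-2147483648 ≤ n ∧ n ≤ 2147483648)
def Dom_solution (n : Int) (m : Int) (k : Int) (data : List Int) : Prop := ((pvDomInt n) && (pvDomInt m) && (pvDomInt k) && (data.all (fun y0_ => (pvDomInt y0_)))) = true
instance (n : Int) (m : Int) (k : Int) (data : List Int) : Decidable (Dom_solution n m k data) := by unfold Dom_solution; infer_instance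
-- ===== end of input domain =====

-- B replaces A's per-pick simulation loop with a closed-form count of picks of the largest
-- element (simpler: a sort plus three arithmetic lines). A sorts `data` in place; B does not
-- mutate its argument — the equivalence proved here is about the return value only.

-- ===== PORT A =====
-- inner `for _ in range(k)` loop: adds data[-1], decrements m, breaks when m == 0
def solInner (kN : Nat) (last : Int) (m answer : Int) : Int × Int :=
  match kN with
  | 0 => (m, answer)
  | kN' + 1 =>
    if m = 0 then (m, answer)
    else solInner kN' last (m - 1) (answer + last)

-- outer `while 1` loop; fuel bounds the iterations (m decreases by ≥ 1 per iteration when m > 0)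
def solLoop (fuel : Nat) (k : Int) (last se : Int) (m answer : Int) : Int :=
  match fuel with
  | 0 => answer
  | fuel' + 1 =>
    let st := solInner k.toNat last m answer
    if st.1 = 0 then st.2
    else solLoop fuel' k last se (st.1 - 1) (st.2 + se)

def solution (n : Int) (m : Int) (k : Int) (data : List Int) : Int :=
  let d := PySem.List.sorted data (fun x => x) false
  match PySem.List.pyGet? d (-2), PySem.List.pyGet? d (-1) with
  | some se, some last => solLoop (m.toNat + 1) k last se m 0
  | _, _ => 0   -- unreachable under Pre_ (IndexError in Python)

-- ===== PORT B =====
def solution_alt (n : Int) (m : Int) (k : Int) (data : List Int) : Int :=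
  let s := PySem.List.sorted data (fun x => x) false
  match PySem.List.pyGet? s (-1) with
  | none => 0   -- unreachable under Pre_ (IndexError in Python)
  | some first =>
    match PySem.List.pyGet? s (-2) with
    | none => 0   -- unreachable under Pre_ (IndexError in Python)
    | some second =>
      match PySem.Int.divmod? m (k + 1) with
      | none => 0   -- unreachable under Pre_ (ZeroDivisionError in Python)
      | some (q, r) =>
        let cnt := q * k + r
        cnt * first + (m - cnt) * second

-- ===== PRECONDITION & SPEC =====
-- Pre_ restricts to the task's natural domain: it excludes lists with fewer than 2 elements
-- (A raises IndexError), m < 0 (A's while-loop never terminates), and negative repeat counts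
-- k < 0, where A's value (m copies of the second-largest, an artefact of range(k) being empty)
-- is not one B's arithmetic produces (B raises for k = -1).
def Pre_solution (n : Int) (m : Int) (k : Int) (data : List Int) : Prop :=
  2 ≤ data.length ∧ 0 ≤ m ∧ 0 ≤ k
instance (n : Int) (m : Int) (k : Int) (data : List Int) : Decidable (Pre_solution n m k data) := by unfold Pre_solution; infer_instance

def pvWitness_solution : Int × Int × Int × List Int := (5, 8, 3, [2, 4, 5, 4, 6])

def Spec_solution (n : Int) (m : Int) (k : Int) (data : List Int) (out : Int) : Prop := out = solution_alt n m k data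
instance (n : Int) (m : Int) (k : Int) (data : List Int) (out : Int) : Decidable (Spec_solution n m k data out) := by unfold Spec_solution; infer_instance

-- ===== CLAIM (what is proved, stated in full; the proofs are below) =====
def Claim_equal_solution : Prop := ∀ (n : Int) (m : Int) (k : Int) (data : List Int), Dom_solution n m k data → Pre_solution n m k data → Spec_solution n m k data (solution n m k data)

-- ===== LEMMAS AND PROOFS =====

-- the inner loop consumes min m k picks of `last`
lemma solInner_eq (kN : Nat) (last : Int) :
    ∀ m answer : Int, 0 ≤ m →
      solInner kN last m answer =
        if (kN : Int) ≤ m then (m - kN, answer + kN * last)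
        else (0, answer + m * last) := by
  induction kN with
  | zero => intro m answer hm; simp [solInner, hm]
  | succ kN' ih =>
    intro m answer hm
    by_cases h0 : m = 0
    · subst h0
      rw [solInner, if_pos rfl, if_neg (by push_cast; omega)]
      simp
    · have hm1 : (0:Int) ≤ m - 1 := by omega
      rw [solInner, if_neg h0, ih (m - 1) (answer + last) hm1]
      by_cases hle : ((kN' : Int) + 1) ≤ m
      · rw [if_pos (by omega), if_pos (by push_cast; omega)]
        rw [Prod.mk.injEq]
        constructor
        · push_cast; ring
        · push_cast; ring
      · rw [if_neg (by omega), if_neg (by push_cast at hle ⊢; omega)]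
        rw [Prod.mk.injEq]
        constructor
        · rfl
        · ring
-- closed-form count of "largest" picks after m picks with pattern (k largest, 1 second)
def pickCnt (m k : Int) : Int :=
  PySem.Int.floordiv m (k + 1) * k + PySem.Int.mod m (k + 1)

lemma pickCnt_small (m k : Int) (hm : 0 ≤ m) (hk : 0 ≤ k) (_h : m ≤ k) :
    pickCnt m k = m := by
  unfold pickCnt
  have hb : (0:Int) < k + 1 := by omega
  rw [PySem.Int.floordiv_eq_ediv_of_pos hb, PySem.Int.mod_eq_emod_of_pos hb]
  rw [Int.ediv_eq_zero_of_lt hm (by omega), Int.emod_eq_of_lt hm (by omega)]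
  ring

lemma pickCnt_step (m k : Int) (hk : 0 ≤ k) (h : k < m) :
    pickCnt m k = k + pickCnt (m - (k + 1)) k := by
  unfold pickCnt
  have hb : (0:Int) < k + 1 := by omega
  rw [PySem.Int.floordiv_eq_ediv_of_pos hb, PySem.Int.mod_eq_emod_of_pos hb,
    PySem.Int.floordiv_eq_ediv_of_pos hb, PySem.Int.mod_eq_emod_of_pos hb]
  have h1 : (m - (k + 1)) / (k + 1) = m / (k + 1) - 1 := by
    have := Int.add_mul_ediv_right m (-1) (show k + 1 ≠ 0 by omega)
    have e : m + (-1) * (k + 1) = m - (k + 1) := by ring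
    rw [e] at this
    omega
  have h2 : (m - (k + 1)) % (k + 1) = m % (k + 1) := Int.sub_emod_right m (k + 1)
  rw [h1, h2]; ring

lemma solLoop_eq (k last se : Int) (hk : 0 ≤ k) :
    ∀ (fuel : Nat) (m answer : Int), 0 ≤ m → m.toNat < fuel →
      solLoop fuel k last se m answer =
        answer + pickCnt m k * last + (m - pickCnt m k) * se := by
  intro fuel
  induction fuel with
  | zero => intro m answer hm hf; omega
  | succ fuel' ih =>
    intro m answer hm hf
    have hkc : ((k.toNat : Nat) : Int) = k := Int.toNat_of_nonneg hk
    rw [solLoop, solInner_eq k.toNat last m answer hm, hkc]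
    by_cases hle : k ≤ m
    · rw [if_pos hle]
      dsimp only
      by_cases hmk : m - k = 0
      · rw [if_pos hmk]
        have hmeq : m = k := by omega
        rw [hmeq, pickCnt_small k k hk hk le_rfl]
        ring
      · rw [if_neg hmk]
        have hm' : (0:Int) ≤ m - k - 1 := by omega
        have hf' : (m - k - 1).toNat < fuel' := by omega
        rw [ih (m - k - 1) (answer + k * last + se) hm' hf']
        rw [pickCnt_step m k hk (by omega)]
        have e : m - k - 1 = m - (k + 1) := by ring
        rw [e]; ring
    · rw [if_neg hle]
      dsimp only
      rw [if_pos rfl, pickCnt_small m k hm hk (by omega)]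
      ring

lemma pyGet_sorted_some (data : List Int) (j : Int) (h2 : 2 ≤ data.length)
    (hj : -2 ≤ j ∧ j < 0) :
    ∃ v, PySem.List.pyGet? (PySem.List.sorted data (fun x => x) false) j = some v := by
  have hlen := PySem.List.length_sorted data (fun x => x) false
  rcases Option.eq_none_or_eq_some (PySem.List.pyGet? (PySem.List.sorted data (fun x => x) false) j) with hn | ⟨v, hv⟩
  · exfalso
    rw [PySem.List.pyGet?_eq_none_iff] at hn
    apply hn
    unfold PySem.Raise.InRange
    rw [hlen]
    omega
  · exact ⟨v, hv⟩

-- ===== VERDICT (by name: the statement is the Claim_ definition above) =====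
theorem solution_spec : Claim_equal_solution := by
  intro n m k data _hdom hpre
  obtain ⟨h2, hm, hk⟩ := hpre
  simp only [Spec_solution, solution, solution_alt]
  obtain ⟨se, hse⟩ := pyGet_sorted_some data (-2) h2 (by omega)
  obtain ⟨last, hlast⟩ := pyGet_sorted_some data (-1) h2 (by omega)
  rw [hse, hlast]
  have hdm : PySem.Int.divmod? m (k + 1) =
      some (PySem.Int.floordiv m (k + 1), PySem.Int.mod m (k + 1)) := by
    simp [PySem.Int.divmod?, PySem.Int.floordiv, PySem.Int.mod, show k + 1 ≠ 0 by omega]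
  rw [hdm]
  dsimp only
  rw [solLoop_eq k last se hk (m.toNat + 1) m 0 hm (by omega)]
  unfold pickCnt
  ring
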